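-- pv_equiv track=rewrite | github.com/wwymak/pytorch_geometric | torch_geometric/datasets/generators/graphworld.py | _get_nesting_map
-- ===== SOURCE A (Python) =====
-- import collections
-- import math
--
-- def _get_nesting_map(large_k, small_k):
--     """Given two group sizes, computes a "nesting map" between groups.
--     This function will produce a bipartite map between two sets of "group nodes"
--     that will be used downstream to partition nodes in a bigger graph. The map
--     encodes which groups from the larger set are nested in certain groups from
--     the smaller set.
--     As currently implemented, nesting is assigned as evenly as possible. If
--     large_k is an integer multiple of small_k, each smaller-set group will be
--     mapped to exactly (large_k/small_k) larger-set groups. If there is a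
--     remainder r, the first r smaller-set groups will each have one extra nested
--     larger-set group.
--     Args:
--       large_k: (int) size of the larger group set
--       small_k: (int) size of the smaller group set
--     Returns:
--       nesting_map: (dict) map from larger group set indices to lists of
--         smaller group set indices
--     """
--     min_multiplicity = int(math.floor(large_k / small_k))
--     max_bloated_group_index = large_k - small_k * min_multiplicity - 1
--     nesting_map = collections.defaultdict(list)
--     pos = 0
--     for i in range(small_k):
--         for _ in range(min_multiplicity + int(i <= max_bloated_group_index)):
--             nesting_map[i].append(pos)
--             pos += 1
--     return nesting_map
-- ===== SOURCE B (Python) =====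
-- import collections
-- import math
--
-- def _get_nesting_map(large_k, small_k):
--     """Single flat pass over positions: each position 0..large_k-1 is assigned
--     to its owner group by integer division, instead of threading a running
--     counter through nested loops."""
--     min_multiplicity = int(math.floor(large_k / small_k))
--     remainder = large_k - small_k * min_multiplicity
--     nesting_map = collections.defaultdict(list)
--     if min_multiplicity >= 0:
--         boundary = remainder * (min_multiplicity + 1)
--         for pos in range(large_k):
--             if pos < boundary:
--                 owner = pos // (min_multiplicity + 1)
--             else:
--                 owner = remainder + (pos - boundary) // min_multiplicity
--             nesting_map[owner].append(pos)
--     return nesting_map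
-- ===== Notes on version B (the rewrite author's own statement) =====
-- stated objective: alternative
-- what changed: Replaced the nested loops with a running position counter by a single flat pass over positions 0..large_k-1 that computes each position's owner group in closed form by integer division.
import Mathlib
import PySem

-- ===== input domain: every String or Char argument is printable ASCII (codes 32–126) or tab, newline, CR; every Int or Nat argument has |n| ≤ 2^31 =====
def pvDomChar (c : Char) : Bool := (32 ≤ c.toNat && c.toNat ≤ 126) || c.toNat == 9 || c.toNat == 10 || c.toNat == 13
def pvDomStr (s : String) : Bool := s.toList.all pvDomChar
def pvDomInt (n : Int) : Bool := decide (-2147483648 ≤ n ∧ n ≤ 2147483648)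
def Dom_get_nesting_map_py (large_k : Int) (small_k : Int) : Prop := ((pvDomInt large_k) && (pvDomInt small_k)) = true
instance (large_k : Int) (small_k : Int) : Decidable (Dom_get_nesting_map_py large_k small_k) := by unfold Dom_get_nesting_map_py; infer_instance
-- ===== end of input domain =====

-- B replaces the nested loops with a running counter by one flat pass over positions,
-- computing each position's owner group in closed form (objective: alternative).

-- ===== PORT A =====
def get_nesting_map_py (large_k : Int) (small_k : Int) : List (Int × List Int) :=
  let min_multiplicity : Int := PySem.Int.floordiv large_k small_k
  let max_bloated_group_index : Int := large_k - small_k * min_multiplicity - 1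
  let st : PySem.Dict Int (List Int) × Int :=
    (PySem.List.pyRange 0 small_k).foldl
      (fun st i =>
        (PySem.List.pyRange 0 (min_multiplicity + (if i ≤ max_bloated_group_index then 1 else 0))).foldl
          (fun st _ => (st.1.modify i [] (fun l => l ++ [st.2]), st.2 + 1)) st)
      (PySem.Dict.empty, 0)
  st.1.items

-- ===== PORT B =====
def get_nesting_map_py_alt (large_k : Int) (small_k : Int) : List (Int × List Int) :=
  let min_multiplicity : Int := PySem.Int.floordiv large_k small_k
  let remainder : Int := large_k - small_k * min_multiplicity
  let nesting_map : PySem.Dict Int (List Int) :=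
    if 0 ≤ min_multiplicity then
      (PySem.List.pyRange 0 large_k).foldl
        (fun d pos =>
          let owner : Int :=
            if pos < remainder * (min_multiplicity + 1) then
              PySem.Int.floordiv pos (min_multiplicity + 1)
            else
              remainder + PySem.Int.floordiv (pos - remainder * (min_multiplicity + 1)) min_multiplicity
          d.modify owner [] (fun l => l ++ [pos]))
        PySem.Dict.empty
    else PySem.Dict.empty
  nesting_map.items

-- ===== PRECONDITION & SPEC =====
-- Pre_ excludes exactly small_k = 0, where A raises ZeroDivisionError (B raises there too).
def Pre_get_nesting_map_py (large_k : Int) (small_k : Int) : Prop := small_k ≠ 0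
instance (large_k : Int) (small_k : Int) : Decidable (Pre_get_nesting_map_py large_k small_k) := by unfold Pre_get_nesting_map_py; infer_instance
def pvWitness_get_nesting_map_py : Int × Int := (7, 3)

def Spec_get_nesting_map_py (large_k : Int) (small_k : Int) (out : List (Int × List Int)) : Prop := out = get_nesting_map_py_alt large_k small_k
instance (large_k : Int) (small_k : Int) (out : List (Int × List Int)) : Decidable (Spec_get_nesting_map_py large_k small_k out) := by unfold Spec_get_nesting_map_py; infer_instance

-- ===== CLAIM (what is proved, stated in full; the proofs are below) =====
def Claim_equal_get_nesting_map_py : Prop := ∀ (large_k : Int) (small_k : Int), Dom_get_nesting_map_py large_k small_k → Pre_get_nesting_map_py large_k small_k → Spec_get_nesting_map_py large_k small_k (get_nesting_map_py large_k small_k)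

-- ===== LEMMAS AND PROOFS =====

-- group i starts at position i*m + min i r and holds m (+1 for the first r groups) positions
def pvStart (m r i : Int) : Int := i * m + min i r
def pvCount (m r i : Int) : Int := m + (if i < r then 1 else 0)
def pvSpec (m r k : Int) : List (Int × List Int) :=
  ((PySem.List.pyRange 0 k).filter (fun i => decide (0 < pvCount m r i))).map
    (fun i => (i, PySem.List.pyRange (pvStart m r i) (pvStart m r i + pvCount m r i)))

theorem pvStart_succ (m r j : Int) : pvStart m r (j + 1) = pvStart m r j + pvCount m r j := by
  have hexp : (j + 1) * m = j * m + m := by ring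
  simp only [pvStart, pvCount]
  by_cases h : j < r
  · rw [min_eq_left (by omega), min_eq_left (by omega), if_pos h]; linarith
  · rw [min_eq_right (by omega), min_eq_right (by omega), if_neg h]; linarith

theorem pvSpec_zero (m r : Int) : pvSpec m r 0 = [] := by
  simp [pvSpec, PySem.List.pyRange_one_eq_nil le_rfl]

theorem pvSpec_succ (m r j : Int) (hj : 0 ≤ j) :
    pvSpec m r (j + 1) = pvSpec m r j ++
      (if 0 < pvCount m r j then
        [(j, PySem.List.pyRange (pvStart m r j) (pvStart m r j + pvCount m r j))] else []) := by
  simp only [pvSpec, PySem.List.pyRange_one_succ_right hj, List.filter_append, List.map_append]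
  congr 1
  by_cases h : 0 < pvCount m r j <;> simp [h]

theorem pvSpec_key_lt (m r k : Int) {p : Int × List Int} (hp : p ∈ pvSpec m r k) : p.1 < k := by
  simp only [pvSpec, List.mem_map, List.mem_filter] at hp
  obtain ⟨i, ⟨hi, _⟩, rfl⟩ := hp
  exact (PySem.List.mem_pyRange_one.mp hi).2

theorem pv_modify_fresh (items : List (Int × List Int)) (i : Int) (f : List Int → List Int)
    (h : ∀ p ∈ items, p.1 ≠ i) :
    (PySem.Dict.mk items).modify i [] f = PySem.Dict.mk (items ++ [(i, f [])]) := by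
  have hfind : items.find? (fun p => p.1 == i) = none := by
    apply List.find?_eq_none.mpr
    intro p hp; simpa using h p hp
  have hcont : (PySem.Dict.mk items).contains i = false := by
    simp only [PySem.Dict.contains, PySem.Dict.items]
    simp only [List.any_eq_false]
    intro p hp; simpa using h p hp
  have hget : (PySem.Dict.mk items).getD i [] = [] := by
    simp [PySem.Dict.getD, PySem.Dict.get?, PySem.Dict.items, hfind]
  apply PySem.Dict.ext
  rw [PySem.Dict.modify, hget, PySem.Dict.items_insert_of_not_contains _ _ hcont]

theorem pv_modify_last (items : List (Int × List Int)) (i : Int) (acc : List Int)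
    (f : List Int → List Int) (h : ∀ p ∈ items, p.1 ≠ i) :
    (PySem.Dict.mk (items ++ [(i, acc)])).modify i [] f
      = PySem.Dict.mk (items ++ [(i, f acc)]) := by
  have hfind : items.find? (fun p => p.1 == i) = none := by
    apply List.find?_eq_none.mpr
    intro p hp; simpa using h p hp
  have hget : (PySem.Dict.mk (items ++ [(i, acc)])).getD i [] = acc := by
    simp [PySem.Dict.getD, PySem.Dict.get?, PySem.Dict.items, List.find?_append, hfind]
  have hcont : (PySem.Dict.mk (items ++ [(i, acc)])).contains i = true := by
    simp [PySem.Dict.contains, PySem.Dict.items]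
  apply PySem.Dict.ext
  rw [PySem.Dict.modify, hget, PySem.Dict.items_insert_of_contains _ _ hcont]
  simp only [PySem.Dict.items, List.map_append]
  congr 1
  · rw [show items.map (fun p => if (p.1 == i) = true then (i, f acc) else p) = items.map id from
      List.map_congr_left (fun p hp => by simp [show (p.1 == i) = false by simpa using h p hp]),
      List.map_id]
  · simp

theorem pv_foldB_acc (xs : List Int) (items : List (Int × List Int)) (i : Int) (acc : List Int)
    (h : ∀ p ∈ items, p.1 ≠ i) :
    xs.foldl (fun d pos => d.modify i [] (fun l => l ++ [pos]))
        (PySem.Dict.mk (items ++ [(i, acc)]))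
      = PySem.Dict.mk (items ++ [(i, acc ++ xs)]) := by
  induction xs generalizing acc with
  | nil => simp
  | cons x xs ih =>
    simp only [List.foldl_cons]
    rw [pv_modify_last items i acc _ h, ih (acc ++ [x])]
    simp

theorem pv_foldB_const (xs : List Int) (items : List (Int × List Int)) (i : Int)
    (h : ∀ p ∈ items, p.1 ≠ i) (hne : xs ≠ []) :
    xs.foldl (fun d pos => d.modify i [] (fun l => l ++ [pos])) (PySem.Dict.mk items)
      = PySem.Dict.mk (items ++ [(i, xs)]) := by
  cases xs with
  | nil => exact absurd rfl hne
  | cons x xs =>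
    simp only [List.foldl_cons]
    rw [pv_modify_fresh items i _ h]
    simpa using pv_foldB_acc xs items i [x] h

theorem pv_foldA_inner (c : Int) (hc : 0 ≤ c) (items : List (Int × List Int)) (i pos : Int)
    (h : ∀ p ∈ items, p.1 ≠ i) :
    (PySem.List.pyRange 0 c).foldl
        (fun st _ => ((st : PySem.Dict Int (List Int) × Int).1.modify i [] (fun l => l ++ [st.2]), st.2 + 1))
        (PySem.Dict.mk items, pos)
      = (if 0 < c then PySem.Dict.mk (items ++ [(i, PySem.List.pyRange pos (pos + c))])
          else PySem.Dict.mk items, pos + c) := by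
  induction c, hc using Int.le_induction with
  | base => simp [PySem.List.pyRange_one_eq_nil le_rfl]
  | succ c hc ih =>
    rw [PySem.List.pyRange_one_succ_right hc, List.foldl_append, ih]
    by_cases h0 : 0 < c
    · simp only [if_pos h0, List.foldl_cons, List.foldl_nil]
      rw [if_pos (by omega : (0:Int) < c + 1)]
      rw [show pos + (c + 1) = (pos + c) + 1 from by ring,
        PySem.List.pyRange_one_succ_right (by omega : pos ≤ pos + c)]
      rw [pv_modify_last items i (PySem.List.pyRange pos (pos + c)) (fun l => l ++ [pos + c]) h]
    · have hc0 : c = 0 := le_antisymm (by omega) hc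
      subst hc0
      simp only [if_neg h0, List.foldl_cons, List.foldl_nil]
      rw [if_pos (by norm_num : (0:Int) < 0 + 1)]
      have hsing : PySem.List.pyRange pos (pos + (0 + 1)) = [pos] := by
        rw [show pos + ((0:Int) + 1) = pos + 1 from by ring,
          PySem.List.pyRange_one_cons (by omega), PySem.List.pyRange_one_eq_nil (by omega)]
      rw [hsing, pv_modify_fresh items i (fun l => l ++ [pos + 0]) h]
      simp only [Prod.mk.injEq]
      exact ⟨by norm_num, by ring⟩

theorem pv_foldA_outer (m r k : Int) (hm : 0 ≤ m) (hr : 0 ≤ r) (hk : 0 ≤ k) :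
    (PySem.List.pyRange 0 k).foldl
        (fun st i =>
          (PySem.List.pyRange 0 (pvCount m r i)).foldl
            (fun st _ => ((st : PySem.Dict Int (List Int) × Int).1.modify i [] (fun l => l ++ [st.2]), st.2 + 1)) st)
        (PySem.Dict.mk [], 0)
      = (PySem.Dict.mk (pvSpec m r k), pvStart m r k) := by
  induction k, hk using Int.le_induction with
  | base =>
    rw [PySem.List.pyRange_one_eq_nil le_rfl, pvSpec_zero]
    simp [pvStart]; omega
  | succ k hk ih =>
    rw [PySem.List.pyRange_one_succ_right hk, List.foldl_append, ih]
    simp only [List.foldl_cons, List.foldl_nil]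
    have hcnt : 0 ≤ pvCount m r k := by simp only [pvCount]; split_ifs <;> omega
    rw [pv_foldA_inner (pvCount m r k) hcnt (pvSpec m r k) k (pvStart m r k)
      (fun p hp => ne_of_lt (pvSpec_key_lt m r k hp)),
      pvSpec_succ m r k hk, pvStart_succ]
    by_cases h0 : 0 < pvCount m r k <;> simp [h0]

theorem pv_fdiv_pos (a b : Int) (hb : 0 < b) : a.fdiv b = a / b := by
  rw [Int.fdiv_eq_ediv]; simp [Int.le_of_lt hb]

theorem pv_owner_eq (m r k pos : Int) (hm : 0 ≤ m) (hr : 0 ≤ r) (hk : 0 ≤ k)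
    (h1 : pvStart m r k ≤ pos) (h2 : pos < pvStart m r k + pvCount m r k) :
    (if pos < r * (m + 1) then PySem.Int.floordiv pos (m + 1)
      else r + PySem.Int.floordiv (pos - r * (m + 1)) m) = k := by
  simp only [pvStart, pvCount] at h1 h2
  by_cases hkr : k < r
  · -- group k is a bloated group: positions k*(m+1) .. (k+1)*(m+1)-1
    rw [min_eq_left (by omega)] at h1 h2
    rw [if_pos hkr] at h2
    have he1 : (k + 1) * (m + 1) = k * m + k + m + 1 := by ring
    have he2 : k * (m + 1) = k * m + k := by ring
    have hrb : (k + 1) * (m + 1) ≤ r * (m + 1) :=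
      mul_le_mul_of_nonneg_right (by omega) (by omega)
    rw [if_pos (by linarith)]
    rw [PySem.Int.floordiv, pv_fdiv_pos _ _ (by omega)]
    have hsplit : pos = (pos - k * (m + 1)) + (m + 1) * k := by ring
    rw [hsplit, Int.add_mul_ediv_left _ _ (by omega : m + 1 ≠ 0),
      Int.ediv_eq_zero_of_lt (by linarith) (by linarith)]
    simp
  · -- group k is a plain group: positions k*m+r .. k*m+r+m-1
    rw [min_eq_right (by omega)] at h1 h2
    rw [if_neg (by omega)] at h2
    have h0m : 0 < m := by linarith
    have he3 : r * (m + 1) = r * m + r := by ring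
    have hrm : r * m ≤ k * m := mul_le_mul_of_nonneg_right (by omega) hm
    rw [if_neg (by linarith)]
    rw [PySem.Int.floordiv, pv_fdiv_pos _ _ h0m]
    have he4 : m * (k - r) = m * k - m * r := by ring
    have hsplit : pos - r * (m + 1) = (pos - r * (m + 1) - m * (k - r)) + m * (k - r) := by ring
    rw [hsplit, Int.add_mul_ediv_left _ _ (by omega : m ≠ 0),
      Int.ediv_eq_zero_of_lt (by nlinarith) (by nlinarith)]
    ring

theorem pv_foldB_outer (m r k : Int) (hm : 0 ≤ m) (hr : 0 ≤ r) (hk : 0 ≤ k) :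
    (PySem.List.pyRange 0 (pvStart m r k)).foldl
        (fun d pos =>
          d.modify (if pos < r * (m + 1) then PySem.Int.floordiv pos (m + 1)
            else r + PySem.Int.floordiv (pos - r * (m + 1)) m) [] (fun l => l ++ [pos]))
        (PySem.Dict.mk [])
      = PySem.Dict.mk (pvSpec m r k) := by
  induction k, hk using Int.le_induction with
  | base =>
    rw [show pvStart m r 0 = 0 from by simp [pvStart]; omega,
      PySem.List.pyRange_one_eq_nil le_rfl, pvSpec_zero]
    simp
  | succ k hk ih =>
    have hcnt : 0 ≤ pvCount m r k := by simp only [pvCount]; split_ifs <;> omega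
    have hs0 : 0 ≤ pvStart m r k := by
      simp only [pvStart]; linarith [mul_nonneg hk hm, le_min hk hr]
    rw [pvStart_succ, PySem.List.pyRange_one_append 0 (pvStart m r k) _ hs0 (by omega),
      List.foldl_append, ih]
    rw [PySem.List.foldl_congr_mem _ _
      (fun d pos => d.modify k [] (fun l => l ++ [pos])) _
      (fun acc pos hpos => by
        have hmem := PySem.List.mem_pyRange_one.mp hpos
        rw [pv_owner_eq m r k pos hm hr hk hmem.1 hmem.2])]
    by_cases h0 : 0 < pvCount m r k
    · rw [pv_foldB_const _ _ _ (fun p hp => ne_of_lt (pvSpec_key_lt m r k hp))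
        (by rw [← List.length_pos_iff, PySem.List.length_pyRange_one]; omega)]
      rw [pvSpec_succ m r k hk, if_pos h0]
    · have : pvCount m r k = 0 := by omega
      rw [this] at *
      rw [PySem.List.pyRange_one_eq_nil (by omega), List.foldl_nil,
        pvSpec_succ m r k hk, if_neg h0]
      simp
-- helper: A's loop is a no-op when every count is nonpositive
theorem pv_foldA_trivial (mm mb : Int) (hneg : mm + 1 ≤ 0) (k : Int) :
    (PySem.List.pyRange 0 k).foldl
        (fun st i =>
          (PySem.List.pyRange 0 (mm + (if i ≤ mb then 1 else 0))).foldl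
            (fun st _ => ((st : PySem.Dict Int (List Int) × Int).1.modify i [] (fun l => l ++ [st.2]), st.2 + 1)) st)
        (PySem.Dict.mk [], 0)
      = (PySem.Dict.mk [], 0) := by
  rw [PySem.List.foldl_congr_mem _ _ (fun st _ => st) _
    (fun acc i _ => by
      rw [PySem.List.pyRange_one_eq_nil (by split_ifs <;> omega), List.foldl_nil])]
  exact PySem.List.foldl_ignore _ _

theorem pv_fdiv_neg_of (a b : Int) (ha : 0 < a) (hb : b < 0) : a.fdiv b < 0 := by
  rw [Int.fdiv_eq_ediv]
  have hq := Int.ediv_add_emod a b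
  have hm0 : 0 ≤ a % b := Int.emod_nonneg a (by omega)
  have hm1 : a % b < -b := by
    have := Int.emod_lt_of_pos a (show (0:Int) < -b by omega)
    simpa [Int.emod_neg] using this
  by_cases hd : 0 ≤ b ∨ b ∣ a
  · rcases hd with h | h
    · omega
    · simp [Or.inr h]
      rcases h with ⟨q, rfl⟩
      rw [Int.mul_ediv_cancel_left _ (by omega)]
      nlinarith
  · simp [hd]
    push_neg at hd
    nlinarith [hd.1]

-- ===== VERDICT (by name: the statement is the Claim_ definition above) =====
theorem get_nesting_map_py_spec : Claim_equal_get_nesting_map_py := by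
  intro large_k small_k _hdom hpre
  unfold Spec_get_nesting_map_py get_nesting_map_py get_nesting_map_py_alt
  simp only []
  set m := PySem.Int.floordiv large_k small_k with hm_def
  rcases lt_trichotomy small_k 0 with hsk | hsk | hsk
  · -- small_k < 0 : A's outer range is empty; B assigns no positions either
    rw [PySem.List.pyRange_one_eq_nil (by omega)]
    simp only [List.foldl_nil]
    by_cases hmn : 0 ≤ m
    · have hlk : large_k ≤ 0 := by
        by_contra h
        push_neg at h
        have := pv_fdiv_neg_of large_k small_k h hsk
        rw [hm_def] at hmn; unfold PySem.Int.floordiv at hmn; omega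
      rw [if_pos hmn, PySem.List.pyRange_one_eq_nil (by omega)]
      simp [PySem.Dict.empty]
    · rw [if_neg hmn]
  · exact absurd hsk hpre
  · -- small_k > 0
    have hfd : m = large_k / small_k := by
      rw [hm_def]; unfold PySem.Int.floordiv; exact pv_fdiv_pos _ _ hsk
    set r := large_k - small_k * m with hr_def
    have hr_mod : r = large_k % small_k := by
      rw [hr_def, hfd]; have := Int.ediv_add_emod large_k small_k; omega
    have hr0 : 0 ≤ r := by rw [hr_mod]; exact Int.emod_nonneg _ (by omega)
    have hrlt : r < small_k := by rw [hr_mod]; exact Int.emod_lt_of_pos _ hsk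
    by_cases hlk : 0 ≤ large_k
    · have hm0 : 0 ≤ m := by rw [hfd]; exact Int.ediv_nonneg hlk (by omega)
      -- A's inner count equals pvCount
      have hA : (PySem.List.pyRange 0 small_k).foldl
          (fun st i =>
            (PySem.List.pyRange 0 (m + (if i ≤ large_k - small_k * m - 1 then 1 else 0))).foldl
              (fun st _ => ((st : PySem.Dict Int (List Int) × Int).1.modify i [] (fun l => l ++ [st.2]), st.2 + 1)) st)
          (PySem.Dict.empty, 0)
          = (PySem.Dict.mk (pvSpec m r small_k), pvStart m r small_k) := by
        rw [show PySem.Dict.empty = PySem.Dict.mk ([] : List (Int × List Int)) from rfl]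
        rw [PySem.List.foldl_congr_mem _ _
          (fun st i =>
            (PySem.List.pyRange 0 (pvCount m r i)).foldl
              (fun st _ => ((st : PySem.Dict Int (List Int) × Int).1.modify i [] (fun l => l ++ [st.2]), st.2 + 1)) st) _
          (fun acc i _ => by
            rw [show m + (if i ≤ large_k - small_k * m - 1 then 1 else 0) = pvCount m r i from by
              simp only [pvCount, hr_def]; split_ifs <;> omega])]
        exact pv_foldA_outer m r small_k hm0 hr0 (by omega)
      rw [hA, if_pos hm0]
      have hend : pvStart m r small_k = large_k := by
        simp only [pvStart]
        rw [min_eq_right (by omega)]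
        omega
      rw [show PySem.Dict.empty = PySem.Dict.mk ([] : List (Int × List Int)) from rfl,
        ← hend, pv_foldB_outer m r small_k hm0 hr0 (by omega)]
    · -- large_k < 0 : m < 0, both empty
      push_neg at hlk
      have hmneg : m < 0 := by
        rw [hfd]; exact Int.ediv_neg_of_neg_of_pos hlk hsk
      rw [show PySem.Dict.empty = PySem.Dict.mk ([] : List (Int × List Int)) from rfl,
        pv_foldA_trivial m (large_k - small_k * m - 1) (by omega) small_k,
        if_neg (by omega)]
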